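-- pv_equiv track=rewrite | github.com/infernet-h2020/pfam_interactions | src/old/backmapping_lib.py | string_isnot_dict
-- ===== SOURCE A (Python) =====
-- def string_isnot_dict(element):
-- 	inquotes = ""
-- 	for c in element:
-- 		if c == '"' or c == "'":
-- 			if c == inquotes:
-- 				inquotes = ""
-- 			elif not inquotes:
-- 				inquotes = c
-- 		elif c == ":" and not inquotes:
-- 			return False
-- 	return True
-- ===== SOURCE B (Python) =====
-- def string_isnot_dict(element):
--     i = 0
--     n = len(element)
--     while i < n:
--         c = element[i]
--         if c == '"' or c == "'":
--             j = element.find(c, i + 1)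
--             if j == -1:
--                 return True
--             i = j + 1
--         elif c == ':':
--             return False
--         else:
--             i += 1
--     return True
-- ===== Notes on version B (the rewrite author's own statement) =====
-- stated objective: alternative
-- what changed: Replaces the per-character loop with an inquotes state flag by an index-driven while loop that jumps over whole quoted regions using str.find of the matching quote char.
import Mathlib
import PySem

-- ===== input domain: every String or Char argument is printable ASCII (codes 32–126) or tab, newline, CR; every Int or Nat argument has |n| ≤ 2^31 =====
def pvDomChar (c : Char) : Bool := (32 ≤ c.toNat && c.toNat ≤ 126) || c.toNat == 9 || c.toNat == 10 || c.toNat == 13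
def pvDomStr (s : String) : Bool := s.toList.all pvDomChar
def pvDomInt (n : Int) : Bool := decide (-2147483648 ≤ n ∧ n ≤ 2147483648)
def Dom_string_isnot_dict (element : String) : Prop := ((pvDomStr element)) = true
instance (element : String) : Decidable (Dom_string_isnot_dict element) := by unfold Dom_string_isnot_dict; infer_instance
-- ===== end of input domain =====

-- B replaces A's per-character loop with an inquotes flag by a quoted-region-skipping scan (same cost; alternative decomposition).


-- ===== PORT A =====
-- state 'inquotes' kept as a String exactly as in the Python ("" = not in quotes)
def pvAGo (inquotes : String) : List Char → Bool
  | [] => true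
  | c :: rest =>
    if c = '"' ∨ c = '\'' then
      if String.ofList [c] = inquotes then pvAGo "" rest
      else if inquotes = "" then pvAGo (String.ofList [c]) rest
      else pvAGo inquotes rest
    else if c = ':' ∧ inquotes = "" then false
    else pvAGo inquotes rest

def string_isnot_dict (element : String) : Bool := pvAGo "" element.toList

-- ===== PORT B =====
-- element.find(c, i+1) followed by i = j+1: the remaining input after jumping past the
-- quoted region is the suffix after the first occurrence of c (none = -1, return True).
def pvBSkip (c : Char) : List Char → Option (List Char)
  | [] => none
  | x :: xs => if x = c then some xs else pvBSkip c xs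

theorem pvBSkip_length (c : Char) : ∀ (l l' : List Char), pvBSkip c l = some l' → l'.length < l.length := by
  intro l
  induction l with
  | nil => intro l' h; simp [pvBSkip] at h
  | cons x xs ih =>
    intro l' h
    simp only [pvBSkip] at h
    split at h
    · cases h; simp
    · exact Nat.lt_trans (ih l' h) (by simp)

def pvBGo : List Char → Bool
  | [] => true
  | c :: rest =>
    if c = '"' ∨ c = '\'' then
      match h : pvBSkip c rest with
      | none => true
      | some rest' => pvBGo rest'
    else if c = ':' then false
    else pvBGo rest
termination_by l => l.length
decreasing_by
  · exact Nat.lt_trans (pvBSkip_length _ _ _ h) (by simp)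
  · simp

def string_isnot_dict_alt (element : String) : Bool := pvBGo element.toList

-- ===== PRECONDITION & SPEC =====
def Spec_string_isnot_dict (element : String) (out : Bool) : Prop := out = string_isnot_dict_alt element
instance (element : String) (out : Bool) : Decidable (Spec_string_isnot_dict element out) := by unfold Spec_string_isnot_dict; infer_instance

-- ===== CLAIM (what is proved, stated in full; the proofs are below) =====
def Claim_equal_string_isnot_dict : Prop := ∀ (element : String), Dom_string_isnot_dict element → Spec_string_isnot_dict element (string_isnot_dict element)

-- ===== LEMMAS AND PROOFS =====

theorem pvOfList_eq_iff (x q : Char) : (String.ofList [x] = String.ofList [q]) ↔ x = q := by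
  constructor
  · intro h; have := congrArg String.toList h; simpa using this
  · intro h; rw [h]

theorem pvOfList_ne_empty (q : Char) : String.ofList [q] ≠ "" := by
  intro h; have := congrArg String.toList h; simp at this

theorem pvAGo_quote (q : Char) (hq : q = '"' ∨ q = '\'') : ∀ (l : List Char),
    pvAGo (String.ofList [q]) l =
      match pvBSkip q l with
      | none => true
      | some l' => pvAGo "" l' := by
  intro l
  induction l with
  | nil => simp [pvAGo, pvBSkip]
  | cons x xs ih =>
    by_cases hxq : x = q
    · subst hxq
      simp [pvAGo, pvBSkip, hq]
    · by_cases hx : x = '"' ∨ x = '\''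
      · simp only [pvAGo, pvBSkip, if_pos hx, if_neg hxq,
          if_neg ((pvOfList_eq_iff x q).not.mpr hxq), if_neg (pvOfList_ne_empty q)]
        exact ih
      · have hcol : ¬ (x = ':' ∧ String.ofList [q] = "") := by
          intro h; exact pvOfList_ne_empty q h.2
        simp only [pvAGo, pvBSkip, if_neg hx, if_neg hcol, if_neg hxq]
        exact ih

theorem pvAB (n : ℕ) : ∀ (l : List Char), l.length ≤ n → pvAGo "" l = pvBGo l := by
  induction n with
  | zero =>
    intro l hl
    have : l = [] := List.eq_nil_of_length_eq_zero (Nat.le_zero.mp hl)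
    subst this; simp [pvAGo, pvBGo]
  | succ n ih =>
    intro l hl
    cases l with
    | nil => simp [pvAGo, pvBGo]
    | cons c rest =>
      have hrest : rest.length ≤ n := by simpa using hl
      by_cases hc : c = '"' ∨ c = '\''
      · have ha : pvAGo "" (c :: rest) = pvAGo (String.ofList [c]) rest := by
          simp only [pvAGo, if_pos hc, if_neg (pvOfList_ne_empty c)]
          exact if_pos trivial
        rw [ha, pvAGo_quote c hc rest]
        rw [pvBGo, if_pos hc]
        cases hsk : pvBSkip c rest with
        | none => simp
        | some l' =>
          exact ih l' (Nat.le_of_lt (Nat.lt_of_lt_of_le (pvBSkip_length c rest l' hsk) hrest))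
      · by_cases hcol : c = ':'
        · simp [pvAGo, pvBGo, hcol]
        · have h1 : ¬ (c = ':' ∧ ("" : String) = "") := by simp [hcol]
          simp only [pvAGo, pvBGo, if_neg hc, if_neg hcol]
          rw [if_neg (by simp [hcol] : ¬(c = ':' ∧ True))]
          exact ih rest hrest

theorem string_isnot_dict_spec : Claim_equal_string_isnot_dict := by
  intro element _
  unfold Spec_string_isnot_dict string_isnot_dict string_isnot_dict_alt
  exact pvAB element.toList.length element.toList le_rfl
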